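-- pv_equiv track=rewrite | github.com/opendatalab/MinerU | mineru/model/table/rec/slanet_plus/matcher.py | decode_logic_points
-- ===== SOURCE A (Python) =====
-- def decode_logic_points(pred_structures):
--     logic_points = []
--     current_row = 0
--     current_col = 0
--     max_rows = 0
--     max_cols = 0
--     occupied_cells = {}  # 用于记录已经被占用的单元格
--
--     def is_occupied(row, col):
--         return (row, col) in occupied_cells
--
--     def mark_occupied(row, col, rowspan, colspan):
--         for r in range(row, row + rowspan):
--             for c in range(col, col + colspan):
--                 occupied_cells[(r, c)] = True
--
--     i = 0
--     while i < len(pred_structures):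
--         token = pred_structures[i]
--
--         if token == "<tr>":
--             current_col = 0  # 每次遇到 <tr> 时，重置当前列号
--         elif token == "</tr>":
--             current_row += 1  # 行结束，行号增加
--         elif token.startswith("<td"):
--             colspan = 1
--             rowspan = 1
--             j = i
--             if token != "<td></td>":
--                 j += 1
--                 # 提取 colspan 和 rowspan 属性
--                 while j < len(pred_structures) and not pred_structures[
--                     j
--                 ].startswith(">"):
--                     if "colspan=" in pred_structures[j]:
--                         colspan = int(pred_structures[j].split("=")[1].strip("\"'"))
--                     elif "rowspan=" in pred_structures[j]:
--                         rowspan = int(pred_structures[j].split("=")[1].strip("\"'"))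
--                     j += 1
--
--             # 跳过已经处理过的属性 token
--             i = j
--
--             # 找到下一个未被占用的列
--             while is_occupied(current_row, current_col):
--                 current_col += 1
--
--             # 计算逻辑坐标
--             r_start = current_row
--             r_end = current_row + rowspan - 1
--             col_start = current_col
--             col_end = current_col + colspan - 1
--
--             # 记录逻辑坐标
--             logic_points.append([r_start, r_end, col_start, col_end])
--
--             # 标记占用的单元格
--             mark_occupied(r_start, col_start, rowspan, colspan)
--
--             # 更新当前列号
--             current_col += colspan
--
--             # 更新最大行数和列数
--             max_rows = max(max_rows, r_end + 1)
--             max_cols = max(max_cols, col_end + 1)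
--
--         i += 1
--
--     return logic_points
-- ===== SOURCE B (Python) =====
-- def _events(tokens):
--     # Pass 1: compress the token stream into logical events:
--     # (0,_,_) = new row, (1,_,_) = row end, (2, rowspan, colspan) = cell.
--     evs = []
--     i = 0
--     n = len(tokens)
--     while i < n:
--         t = tokens[i]
--         if t == "<tr>":
--             evs.append((0, 0, 0))
--         elif t == "</tr>":
--             evs.append((1, 0, 0))
--         elif t.startswith("<td"):
--             rs = cs = 1
--             if t != "<td></td>":
--                 j = i + 1
--                 while j < n and not tokens[j].startswith(">"):
--                     j += 1
--                 for a in tokens[i + 1 : j]: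
--                     if "colspan=" in a:
--                         cs = int(a.split("=")[1].strip("\"'"))
--                     elif "rowspan=" in a:
--                         rs = int(a.split("=")[1].strip("\"'"))
--                 i = j
--             evs.append((2, rs, cs))
--         i += 1
--     return evs
--
--
-- def decode_logic_points(pred_structures):
--     # Pass 2: place cells; per-column "blocked until row" bound replaces
--     # the cell-by-cell occupancy map.
--     out = []
--     row = col = 0
--     blocked = {}  # column -> first row at which it becomes free again
--     for kind, rs, cs in _events(pred_structures):
--         if kind == 0:
--             col = 0
--         elif kind == 1:
--             row += 1
--         else:
--             while blocked.get(col, 0) > row: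
--                 col += 1
--             out.append([row, row + rs - 1, col, col + cs - 1])
--             until = row + rs
--             for c in range(col, col + cs):
--                 if blocked.get(c, 0) < until:
--                     blocked[c] = until
--             col += cs
--     return out
-- ===== Notes on version B (the rewrite author's own statement) =====
-- stated objective: alternative
-- what changed: A is one monolithic while-loop over raw tokens that marks every (row,col) cell covered by a span in an occupied_cells dict; B is two staged passes: a tokenizer that compresses the stream into row/row-end/cell(rowspan,colspan) events, then a placement fold over events that keeps a single 'blocked until this row' bound per column (colspan updates per cell instead of rowspan*colspan insertions).
import Mathlib
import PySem

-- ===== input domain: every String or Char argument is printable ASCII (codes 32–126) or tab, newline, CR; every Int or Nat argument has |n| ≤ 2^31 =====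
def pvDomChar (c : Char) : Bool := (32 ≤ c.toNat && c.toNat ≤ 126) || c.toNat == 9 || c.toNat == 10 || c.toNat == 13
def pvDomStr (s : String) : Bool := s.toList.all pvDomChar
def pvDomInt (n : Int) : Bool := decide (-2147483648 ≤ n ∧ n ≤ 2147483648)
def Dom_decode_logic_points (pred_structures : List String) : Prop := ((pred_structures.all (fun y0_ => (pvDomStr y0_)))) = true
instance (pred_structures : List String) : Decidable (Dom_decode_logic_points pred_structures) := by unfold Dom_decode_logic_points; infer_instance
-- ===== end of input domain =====

-- B replaces A's single token-loop with cell-by-cell occupied_cells dictionary by two staged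
-- passes: a tokenizer producing row/row-end/cell events, then a placement fold keeping one
-- per-column "blocked until row" bound — an alternative decomposition, not claimed faster.


-- ===== PORT A =====
-- int(tok.split("=")[1].strip("\"'")); the .getD fallbacks are reached only outside Pre_ (ValueError)
def pvGetSpan (t : String) : Int :=
  (PySem.Int.ofStr? (PySem.Str.stripChars (((PySem.Str.split? t "=").getD []).getD 1 "") "\"'")).getD 0

-- the attribute-scanning inner while loop of A: consumes tokens up to (and including) the ">" token
def pvScanA : List String → Int → Int → Int × Int × List String
  | [], cs, rs => (cs, rs, [])
  | t :: rest, cs, rs =>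
    if PySem.Str.startswith t ">" then (cs, rs, rest)
    else if PySem.Str.isIn "colspan=" t then pvScanA rest (pvGetSpan t) rs
    else if PySem.Str.isIn "rowspan=" t then pvScanA rest cs (pvGetSpan t)
    else pvScanA rest cs rs

theorem pvScanA_length_le : ∀ (l : List String) (cs rs : Int), (pvScanA l cs rs).2.2.length ≤ l.length := by
  intro l
  induction l with
  | nil => intro cs rs; simp [pvScanA]
  | cons t rest ih =>
    intro cs rs
    simp only [pvScanA]
    split_ifs <;> simp <;> exact le_trans (ih _ _) (Nat.le_succ _)

-- 'while is_occupied(row, col): col += 1'; the fuel is a totality artifact, always sufficient (pigeonhole)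
def pvSkip (P : Int → Bool) (c : Int) : Nat → Int
  | 0 => c
  | f + 1 => if P c then pvSkip P (c + 1) f else c

-- mark_occupied: nested for-loops inserting every covered cell
def pvMarkA (occ : PySem.Dict (Int × Int) Bool) (row col rs cs : Int) : PySem.Dict (Int × Int) Bool :=
  (PySem.List.pyRange row (row + rs) 1).foldl
    (fun d r => (PySem.List.pyRange col (col + cs) 1).foldl (fun d c => d.insert (r, c) true) d) occ

def pvLoopA : List String → Int → Int → Int → Int → PySem.Dict (Int × Int) Bool → List (List Int) → List (List Int)
  | [], _, _, _, _, _, pts => pts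
  | token :: rest, row, col, maxR, maxC, occ, pts =>
    if token == "<tr>" then pvLoopA rest row 0 maxR maxC occ pts
    else if token == "</tr>" then pvLoopA rest (row + 1) col maxR maxC occ pts
    else if PySem.Str.startswith token "<td" then
      let scanned := if token == "<td></td>" then (1, 1, rest) else pvScanA rest 1 1
      let col' := pvSkip (fun c => occ.contains (row, c)) col (occ.items.length + 1)
      pvLoopA scanned.2.2 row (col' + scanned.1)
        (max maxR (row + scanned.2.1 - 1 + 1)) (max maxC (col' + scanned.1 - 1 + 1))
        (pvMarkA occ row col' scanned.2.1 scanned.1)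
        (pts ++ [[row, row + scanned.2.1 - 1, col', col' + scanned.1 - 1]])
    else pvLoopA rest row col maxR maxC occ pts
  termination_by toks => toks.length
  decreasing_by
    all_goals try split
    all_goals simp
    all_goals exact pvScanA_length_le rest 1 1

def decode_logic_points (pred_structures : List String) : List (List Int) :=
  pvLoopA pred_structures 0 0 0 0 PySem.Dict.empty []

-- ===== PORT B =====
-- B pass 1: the events produced by _events; (kind, rowspan, colspan) as in Source B
inductive PvEvent
  | tr
  | endr
  | cell (rs cs : Int)
deriving DecidableEq, Repr

-- the 'for a in tokens[i+1:j]' attribute fold of Source B (accumulator (rs, cs))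
def pvSegSpans (seg : List String) (rs cs : Int) : Int × Int :=
  seg.foldl (fun p a =>
    if PySem.Str.isIn "colspan=" a then (p.1, pvGetSpan a)
    else if PySem.Str.isIn "rowspan=" a then (pvGetSpan a, p.2)
    else p) (rs, cs)

-- Source B finds j = first index with a ">"-starting token and folds over tokens[i+1:j];
-- that slice is exactly the takeWhile below, and resuming at j means dropping seg and the ">"
def pvParse : List String → List PvEvent
  | [] => []
  | t :: rest =>
    if t == "<tr>" then .tr :: pvParse rest
    else if t == "</tr>" then .endr :: pvParse rest
    else if PySem.Str.startswith t "<td" then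
      if t == "<td></td>" then .cell 1 1 :: pvParse rest
      else
        let seg := rest.takeWhile (fun a => !PySem.Str.startswith a ">")
        let p := pvSegSpans seg 1 1
        .cell p.1 p.2 :: pvParse (rest.drop (seg.length + 1))
    else pvParse rest
  termination_by l => l.length
  decreasing_by
    all_goals simp [List.length_drop]

-- 'for c in range(col, col+colspan): if blocked.get(c,0) < until: blocked[c] = until'
def pvBlockB (bl : PySem.Dict Int Int) (col cs untl : Int) : PySem.Dict Int Int :=
  (PySem.List.pyRange col (col + cs) 1).foldl
    (fun d c => if d.getD c 0 < untl then d.insert c untl else d) bl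

-- B pass 2: the placement step for one event; state = (row, col, blocked, out)
def pvStep (st : Int × Int × PySem.Dict Int Int × List (List Int)) :
    PvEvent → Int × Int × PySem.Dict Int Int × List (List Int)
  | .tr => (st.1, 0, st.2.2)
  | .endr => (st.1 + 1, st.2)
  | .cell rs cs =>
    let row := st.1
    let bl := st.2.2.1
    let col' := pvSkip (fun c => decide (row < bl.getD c 0)) st.2.1 (bl.items.length + 1)
    (row, col' + cs, pvBlockB bl col' cs (row + rs),
      st.2.2.2 ++ [[row, row + rs - 1, col', col' + cs - 1]])

def decode_logic_points_alt (pred_structures : List String) : List (List Int) :=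
  ((pvParse pred_structures).foldl pvStep (0, 0, PySem.Dict.empty, [])).2.2.2

-- ===== PRECONDITION & SPEC =====
-- Pre_ excludes exactly the inputs on which A's int() raises ValueError: a token that contains
-- "colspan="/"rowspan=" but whose value part does not parse as an int, sitting in an attribute-scan
-- position (after a "<td" opener other than "<td></td>", with no ">"-starting token in between).
def Pre_decode_logic_points (pred_structures : List String) : Prop :=
  ∀ j, j < pred_structures.length → ∀ i, i < j →
    PySem.Str.startswith (pred_structures.getD i "") "<td" = true →
    pred_structures.getD i "" ≠ "<td></td>" →
    (∀ m, m ≤ j → i < m → PySem.Str.startswith (pred_structures.getD m "") ">" = false) →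
    (PySem.Str.isIn "colspan=" (pred_structures.getD j "") = true ∨
     PySem.Str.isIn "rowspan=" (pred_structures.getD j "") = true) →
    (PySem.Int.ofStr? (PySem.Str.stripChars
      (((PySem.Str.split? (pred_structures.getD j "") "=").getD []).getD 1 "") "\"'")).isSome = true
instance (pred_structures : List String) : Decidable (Pre_decode_logic_points pred_structures) := by
  unfold Pre_decode_logic_points
  exact @Nat.decidableBallLT _ _ (fun j hj => @Nat.decidableBallLT _ _ (fun i hi => inferInstance))

def pvWitness_decode_logic_points : List String :=
  ["<tr>", "<td", "colspan=\"2\"", "rowspan=\"2\"", ">", "<td></td>", "</tr>", "<tr>", "<td></td>", "</tr>"]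

def Spec_decode_logic_points (pred_structures : List String) (out : List (List Int)) : Prop := out = decode_logic_points_alt pred_structures
instance (pred_structures : List String) (out : List (List Int)) : Decidable (Spec_decode_logic_points pred_structures out) := by unfold Spec_decode_logic_points; infer_instance

-- ===== CLAIM (what is proved, stated in full; the proofs are below) =====
def Claim_equal_decode_logic_points : Prop := ∀ (pred_structures : List String), Dom_decode_logic_points pred_structures → Pre_decode_logic_points pred_structures → Spec_decode_logic_points pred_structures (decode_logic_points pred_structures)

-- ===== LEMMAS AND PROOFS =====

-- A's incremental attribute scan equals B's takeWhile segment + fold, with the pair swapped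
theorem pvScanA_eq : ∀ (l : List String) (cs rs : Int),
    pvScanA l cs rs =
      ((pvSegSpans (l.takeWhile (fun a => !PySem.Str.startswith a ">")) rs cs).2,
       (pvSegSpans (l.takeWhile (fun a => !PySem.Str.startswith a ">")) rs cs).1,
       l.drop ((l.takeWhile (fun a => !PySem.Str.startswith a ">")).length + 1)) := by
  intro l
  induction l with
  | nil => intro cs rs; simp [pvScanA, pvSegSpans]
  | cons t rest ih =>
    intro cs rs
    simp only [pvScanA, pvSegSpans, List.takeWhile_cons]
    cases hgt : PySem.Str.startswith t ">" with
    | true => simp [hgt]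
    | false =>
      simp only [hgt, Bool.not_false, if_true, Bool.false_eq_true, if_false,
        List.foldl_cons, List.length_cons, List.drop_succ_cons]
      split_ifs <;> simp [ih, pvSegSpans]

-- the two free-column searches agree when the predicates agree pointwise and both fuels suffice
theorem pvSkip_congr : ∀ (f : Nat) (c : Int) (g : Nat) (P Q : Int → Bool),
    (∀ x, P x = Q x) →
    (∃ k : Nat, k < f ∧ P (c + k) = false) →
    (∃ k : Nat, k < g ∧ Q (c + k) = false) →
    pvSkip P c f = pvSkip Q c g := by
  intro f
  induction f with
  | zero => rintro c g P Q _ ⟨k, hk, _⟩ _; omega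
  | succ f ih =>
    rintro c g P Q hPQ ⟨k, hk, hkf⟩ ⟨m, hm, hmf⟩
    match g with
    | 0 => omega
    | g + 1 =>
      simp only [pvSkip, hPQ c]
      cases hc : Q c with
      | false => simp [hc]
      | true =>
        rw [if_pos rfl, if_pos rfl]
        have hk0 : k ≠ 0 := by
          rintro rfl; rw [hPQ] at hkf; simp only [Nat.cast_zero, add_zero] at hkf
          rw [hkf] at hc; simp at hc
        have hm0 : m ≠ 0 := by
          rintro rfl; simp only [Nat.cast_zero, add_zero] at hmf
          rw [hmf] at hc; simp at hc
        apply ih _ _ _ _ hPQ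
        · refine ⟨k - 1, by omega, ?_⟩
          have hEq : c + 1 + ((k - 1 : Nat) : Int) = c + k := by push_cast; omega
          rw [hEq]; exact hkf
        · refine ⟨m - 1, by omega, ?_⟩
          have hEq : c + 1 + ((m - 1 : Nat) : Int) = c + m := by push_cast; omega
          rw [hEq]; exact hmf

theorem pvNodupSubsetLen {α : Type} [DecidableEq α] (l1 l2 : List α) (h : l1.Nodup) (hs : l1 ⊆ l2) :
    l1.length ≤ l2.length :=
  calc l1.length = l1.toFinset.card := (List.toFinset_card_of_nodup h).symm
    _ ≤ l2.toFinset.card := Finset.card_le_card (by intro x hx; simp at hx ⊢; exact hs hx)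
    _ ≤ l2.length := List.toFinset_card_le l2

-- fuel sufficiency for A's search: at most |occ| consecutive columns can be occupied
theorem pvSkipFuelA (occ : PySem.Dict (Int × Int) Bool) (row col : Int) (hnd : occ.keys.Nodup) :
    ∃ k : Nat, k < occ.items.length + 1 ∧ occ.contains (row, col + k) = false := by
  by_contra h
  push_neg at h
  have hall : ∀ k : Nat, k < occ.items.length + 1 → occ.contains (row, col + (k : Int)) = true := by
    intro k hk
    have hne := h k hk
    cases hc : occ.contains (row, col + (k : Int)) with
    | false => exact absurd hc hne
    | true => rfl
  have hsub : ((List.range (occ.items.length + 1)).map (fun k : Nat => ((row, col + (k : Int)) : Int × Int))) ⊆ occ.keys := by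
    intro p hp
    simp only [List.mem_map, List.mem_range] at hp
    obtain ⟨k, hk, rfl⟩ := hp
    exact (PySem.Dict.contains_iff_mem_keys _ _).mp (hall k hk)
  have hinj : Function.Injective (fun k : Nat => ((row, col + (k : Int)) : Int × Int)) := by
    intro a b hab
    simp only [Prod.mk.injEq] at hab
    omega
  have hlen := pvNodupSubsetLen _ _ (List.nodup_range.map hinj) hsub
  simp only [List.length_map, List.length_range] at hlen
  have hkeys : occ.keys.length = occ.items.length := by simp [PySem.Dict.keys]
  omega

-- fuel sufficiency for B's search: a blocked column is a key of the dict
theorem pvSkipFuelB (bl : PySem.Dict Int Int) (row col : Int) (hrow : 0 ≤ row) (hnd : bl.keys.Nodup) :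
    ∃ k : Nat, k < bl.items.length + 1 ∧ (decide (row < bl.getD (col + k) 0)) = false := by
  by_contra h
  push_neg at h
  have hall : ∀ k : Nat, k < bl.items.length + 1 → row < bl.getD (col + (k : Int)) 0 := by
    intro k hk
    have hne := h k hk
    by_cases hc : row < bl.getD (col + (k : Int)) 0
    · exact hc
    · exact absurd (by simp [hc]) hne
  have hsub : ((List.range (bl.items.length + 1)).map (fun k : Nat => col + (k : Int))) ⊆ bl.keys := by
    intro c hc
    simp only [List.mem_map, List.mem_range] at hc
    obtain ⟨k, hk, rfl⟩ := hc
    by_contra hmem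
    have hcon : bl.contains (col + (k : Int)) = false := by
      cases hcc : bl.contains (col + (k : Int)) with
      | false => rfl
      | true => exact absurd ((PySem.Dict.contains_iff_mem_keys _ _).mp hcc) hmem
    have h0 := PySem.Dict.getD_of_not_contains (d := bl) (k := col + (k : Int)) (d0 := 0) hcon
    have h1 := hall k hk
    omega
  have hinj : Function.Injective (fun k : Nat => col + (k : Int)) := by
    intro a b hab
    simp only at hab
    omega
  have hlen := pvNodupSubsetLen _ _ (List.nodup_range.map hinj) hsub
  simp only [List.length_map, List.length_range] at hlen
  have hkeys : bl.keys.length = bl.items.length := by simp [PySem.Dict.keys]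
  omega

-- membership after the inner marking loop over one row
theorem pvContainsInner (l : List Int) (d : PySem.Dict (Int × Int) Bool) (r : Int) (p : Int × Int) :
    ((l.foldl (fun d c => d.insert (r, c) true) d).contains p = true ↔
      d.contains p = true ∨ (p.1 = r ∧ p.2 ∈ l)) := by
  rw [PySem.Dict.contains_iff_mem_keys, PySem.Dict.contains_iff_mem_keys,
    PySem.Dict.keys_foldl_insert_key (key := fun c => ((r, c) : Int × Int))]
  rw [PySem.Set.mem_update]
  constructor
  · rintro (h | h)
    · exact Or.inl h
    · simp only [List.mem_map] at h
      obtain ⟨c, hc, rfl⟩ := h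
      exact Or.inr ⟨rfl, hc⟩
  · rintro (h | ⟨h1, h2⟩)
    · exact Or.inl h
    · right
      simp only [List.mem_map]
      exact ⟨p.2, h2, by rw [← h1]⟩

theorem pvContainsMark (rl : List Int) (cl : List Int) (d : PySem.Dict (Int × Int) Bool) (p : Int × Int) :
    ((rl.foldl (fun d r => cl.foldl (fun d c => d.insert (r, c) true) d) d).contains p = true ↔
      d.contains p = true ∨ (p.1 ∈ rl ∧ p.2 ∈ cl)) := by
  induction rl generalizing d with
  | nil => simp
  | cons r rl ih =>
    simp only [List.foldl_cons, ih, pvContainsInner, List.mem_cons]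
    tauto

theorem pvNodupMark (rl : List Int) (cl : List Int) (d : PySem.Dict (Int × Int) Bool) (h : d.keys.Nodup) :
    ((rl.foldl (fun d r => cl.foldl (fun d c => d.insert (r, c) true) d) d)).keys.Nodup := by
  induction rl generalizing d with
  | nil => exact h
  | cons r rl ih =>
    exact ih _ (PySem.Dict.nodup_keys_foldl_insert_key cl (fun c => ((r, c) : Int × Int)) _ d h)

-- value after B's blocking loop: max with 'untl' on the touched columns
theorem pvGetDBlock (l : List Int) (d : PySem.Dict Int Int) (u x : Int) :
    ((l.foldl (fun d c => if d.getD c 0 < u then d.insert c u else d) d).getD x 0) =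
      if x ∈ l then max (d.getD x 0) u else d.getD x 0 := by
  induction l generalizing d with
  | nil => simp
  | cons c l ih =>
    simp only [List.foldl_cons, ih, List.mem_cons]
    have hstep : (if d.getD c 0 < u then d.insert c u else d).getD x 0 =
        if x = c then max (d.getD c 0) u else d.getD x 0 := by
      by_cases h1 : d.getD c 0 < u
      · rw [if_pos h1, PySem.Dict.getD_insert]
        by_cases h2 : x = c
        · simp only [if_pos h2]; omega
        · simp only [if_neg h2]
      · rw [if_neg h1]
        by_cases h2 : x = c
        · rw [if_pos h2, h2]; omega
        · rw [if_neg h2]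
    by_cases hxl : x ∈ l
    · simp only [if_pos hxl, if_pos (Or.inr hxl), hstep]
      by_cases hxc : x = c
      · simp only [if_pos hxc, hxc]; omega
      · simp only [if_neg hxc]
    · simp only [if_neg hxl, hstep]
      by_cases hxc : x = c
      · simp [hxc]
      · simp [hxc, hxl]

theorem pvNodupBlock (l : List Int) (d : PySem.Dict Int Int) (u : Int) (h : d.keys.Nodup) :
    ((l.foldl (fun d c => if d.getD c 0 < u then d.insert c u else d) d)).keys.Nodup := by
  induction l generalizing d with
  | nil => exact h
  | cons c l ih =>
    simp only [List.foldl_cons]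
    apply ih
    by_cases h1 : d.getD c 0 < u
    · rw [if_pos h1]; exact PySem.Dict.nodup_keys_insert _ _ _ h
    · rw [if_neg h1]; exact h

-- the main simulation: A's token loop matches B's event fold, A's cell map and B's
-- blocked-until map staying in lockstep
theorem pvMain : ∀ (n : Nat) (toks : List String), toks.length ≤ n →
    ∀ (row col maxR maxC : Int) (occ : PySem.Dict (Int × Int) Bool) (bl : PySem.Dict Int Int)
      (pts : List (List Int)),
    0 ≤ row →
    occ.keys.Nodup → bl.keys.Nodup →
    (∀ r c : Int, row ≤ r → (occ.contains (r, c) = true ↔ r < bl.getD c 0)) →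
    pvLoopA toks row col maxR maxC occ pts = ((pvParse toks).foldl pvStep (row, col, bl, pts)).2.2.2 := by
  intro n
  induction n with
  | zero =>
    intro toks hlen
    have : toks = [] := List.eq_nil_of_length_eq_zero (by omega)
    subst this
    intro _ _ _ _ _ _ _ _ _ _ _
    simp [pvLoopA, pvParse]
  | succ n ih =>
    intro toks hlen row col maxR maxC occ bl pts hrow hndA hndB hinv
    match toks with
    | [] => simp [pvLoopA, pvParse]
    | token :: rest =>
      simp only [pvLoopA, pvParse]
      have hrest : rest.length ≤ n := by simp at hlen; omega
      by_cases h1 : token = "<tr>"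
      · simp only [h1, beq_self_eq_true, if_true, List.foldl_cons, pvStep]
        exact ih rest hrest _ _ _ _ _ _ _ hrow hndA hndB hinv
      · have e1 : (token == "<tr>") = false := beq_eq_false_iff_ne.mpr h1
        simp only [e1, Bool.false_eq_true, if_false]
        by_cases h2 : token = "</tr>"
        · simp only [h2, beq_self_eq_true, if_true, List.foldl_cons, pvStep]
          exact ih rest hrest _ _ _ _ _ _ _
            (by omega) hndA hndB (fun r c hr => hinv r c (by omega))
        · have e2 : (token == "</tr>") = false := beq_eq_false_iff_ne.mpr h2
          simp only [e2, Bool.false_eq_true, if_false]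
          by_cases h3 : PySem.Str.startswith token "<td" = true
          · simp only [h3, if_true]
            -- align A's scanned triple with B's event fields and remainder
            have hPQ : ∀ x, (occ.contains (row, x)) = decide (row < bl.getD x 0) := by
              intro x
              have hx := hinv row x le_rfl
              cases hcc : occ.contains (row, x) with
              | true => simp only [hcc] at hx; simp [hx.mp trivial]
              | false =>
                have hnot : ¬ (row < bl.getD x 0) := fun hh => by
                  rw [hx.mpr hh] at hcc; cases hcc
                simp [hnot]
            have hskip := pvSkip_congr (occ.items.length + 1) col (bl.items.length + 1)
              (fun c => occ.contains (row, c)) (fun c => decide (row < bl.getD c 0)) hPQ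
              (pvSkipFuelA occ row col hndA) (pvSkipFuelB bl row col hrow hndB)
            by_cases htd : token = "<td></td>"
            · simp only [htd, beq_self_eq_true, if_true, List.foldl_cons, pvStep, ← hskip]
              apply ih rest hrest row _ _ _ _ _ _ hrow
              · exact pvNodupMark _ _ _ hndA
              · exact pvNodupBlock _ _ _ hndB
              · intro r c hr
                rw [pvMarkA, pvBlockB, pvContainsMark, pvGetDBlock, hinv r c hr]
                simp only [PySem.List.mem_pyRange_one]
                split_ifs with h <;> omega
            · have etd : (token == "<td></td>") = false := beq_eq_false_iff_ne.mpr htd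
              simp only [etd, Bool.false_eq_true, if_false, List.foldl_cons, pvStep,
                pvScanA_eq rest 1 1, ← hskip]
              have hlen' : (rest.drop ((rest.takeWhile (fun a => !PySem.Str.startswith a ">")).length + 1)).length ≤ n := by
                simp only [List.length_drop]
                omega
              apply ih _ hlen' row _ _ _ _ _ _ hrow
              · exact pvNodupMark _ _ _ hndA
              · exact pvNodupBlock _ _ _ hndB
              · intro r c hr
                rw [pvMarkA, pvBlockB, pvContainsMark, pvGetDBlock, hinv r c hr]
                simp only [PySem.List.mem_pyRange_one]
                split_ifs with h <;> omega
          · have e3 : PySem.Str.startswith token "<td" = false := by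
              cases hb : PySem.Str.startswith token "<td" with
              | false => rfl
              | true => exact absurd hb h3
            simp only [e3, Bool.false_eq_true, if_false]
            exact ih rest hrest _ _ _ _ _ _ _ hrow hndA hndB hinv

-- ===== VERDICT (by name: the statement is the Claim_ definition above) =====
theorem decode_logic_points_spec : Claim_equal_decode_logic_points := by
  intro pred_structures _hDom _hPre
  unfold Spec_decode_logic_points decode_logic_points decode_logic_points_alt
  apply pvMain pred_structures.length pred_structures le_rfl
  · omega
  · simp [PySem.Dict.empty, PySem.Dict.keys]
  · simp [PySem.Dict.empty, PySem.Dict.keys]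
  · intro r c hr
    simp only [PySem.Dict.contains_empty, PySem.Dict.getD_empty]
    constructor
    · intro h; simp at h
    · intro h; omega
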